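-- pv_equiv track=rewrite | github.com/ericabrody/data_explore | funct.py | twovar
-- ===== SOURCE A (Python) =====
-- def twovar (data, var1, var2):
--   ''' Creates a dictionary of dictionaries that show for each level of var1, the frequency of each response of var 2
--       - best used with categorical varilabes'''
--   result = {}
--   for row in data:
--     value1=row[var1]
--     value2=row[var2]
--     if value1 not in result: # creating a dictionary for each level of state, the first time a row has a state that hasn't been seen yet in the for loop
--       result[value1] = {}
--     if value2 not in result[value1]: # once you have dict for state, add response values to it
--       result[value1][value2] = 1 # if response value new, i.e., new key in the state dict, then the value for that key is 1, after that the value for the key is x + 1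
--     else:
--       result[value1][value2] += 1
--   return result
-- ===== SOURCE B (Python) =====
-- def twovar(data, var1, var2):
--     # Pass 1: one flat count table keyed by the (var1-value, var2-value) pair.
--     flat = {}
--     for row in data:
--         key = (row[var1], row[var2])
--         flat[key] = flat.get(key, 0) + 1
--     # Pass 2: pivot the flat table into the nested dict-of-dicts shape.
--     result = {}
--     for (v1, v2), cnt in flat.items():
--         if v1 in result:
--             result[v1][v2] = cnt
--         else:
--             result[v1] = {v2: cnt}
--     return result
-- ===== Notes on version B (the rewrite author's own statement) =====
-- stated objective: simpler
-- what changed: Instead of growing nested dicts incrementally per row, B builds one flat count table keyed by the (var1-value, var2-value) pair in a single pass and then pivots that flat table into the nested dict-of-dicts shape in a second pass.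
import Mathlib
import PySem

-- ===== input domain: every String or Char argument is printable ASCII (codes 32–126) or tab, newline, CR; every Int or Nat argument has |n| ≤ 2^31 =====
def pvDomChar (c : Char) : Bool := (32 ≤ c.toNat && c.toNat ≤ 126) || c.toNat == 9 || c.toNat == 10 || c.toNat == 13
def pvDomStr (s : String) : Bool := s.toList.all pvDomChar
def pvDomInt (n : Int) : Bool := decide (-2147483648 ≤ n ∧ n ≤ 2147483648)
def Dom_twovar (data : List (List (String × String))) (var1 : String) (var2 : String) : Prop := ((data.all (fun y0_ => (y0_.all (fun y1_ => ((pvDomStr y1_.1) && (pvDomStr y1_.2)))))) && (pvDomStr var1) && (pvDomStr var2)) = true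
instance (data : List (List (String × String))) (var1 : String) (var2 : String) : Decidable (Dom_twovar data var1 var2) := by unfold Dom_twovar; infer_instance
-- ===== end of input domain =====

-- B rebuilds the nested frequency table in two flat passes (one flat pair-count table, then a pivot) instead of growing nested dicts incrementally; objective: simpler.
-- Equivalence is about the RETURN value (A mutates nothing observable).

-- ===== PORT A =====
def twovar (data : List (List (String × String))) (var1 : String) (var2 : String) : List (String × List (String × Int)) :=
  ((data.foldl (fun result row =>
      let value1 := (PySem.Dict.mk row).getD var1 ""          -- row[var1]; total under Pre_ (key present)
      let value2 := (PySem.Dict.mk row).getD var2 ""          -- row[var2]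
      let result := if result.contains value1 then result else result.insert value1 PySem.Dict.empty
      let inner := result.getD value1 PySem.Dict.empty
      if inner.contains value2 then
        result.insert value1 (inner.insert value2 (inner.getD value2 0 + 1))
      else
        result.insert value1 (inner.insert value2 1))
    (PySem.Dict.empty : PySem.Dict String (PySem.Dict String Int))).items).map (fun p => (p.1, p.2.items))

-- ===== PORT B =====
def twovar_alt (data : List (List (String × String))) (var1 : String) (var2 : String) : List (String × List (String × Int)) :=
  -- pass 1: flat count table keyed by the (var1-value, var2-value) pair
  let flat : PySem.Dict (String × String) Int :=
    data.foldl (fun flat row =>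
      let key := ((PySem.Dict.mk row).getD var1 "", (PySem.Dict.mk row).getD var2 "")
      flat.insert key (flat.getD key 0 + 1)) PySem.Dict.empty
  -- pass 2: pivot the flat table into the nested shape
  ((flat.items.foldl (fun result q =>
      if result.contains q.1.1 then
        result.insert q.1.1 ((result.getD q.1.1 PySem.Dict.empty).insert q.1.2 q.2)
      else
        result.insert q.1.1 (PySem.Dict.mk [(q.1.2, q.2)]))
    (PySem.Dict.empty : PySem.Dict String (PySem.Dict String Int))).items).map (fun p => (p.1, p.2.items))

-- ===== PRECONDITION & SPEC =====
-- Pre_: every row has both keys var1 and var2 (Python A raises KeyError otherwise).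
def Pre_twovar (data : List (List (String × String))) (var1 : String) (var2 : String) : Prop :=
  data.all (fun row => (PySem.Dict.mk row).contains var1 && (PySem.Dict.mk row).contains var2) = true
instance (data : List (List (String × String))) (var1 : String) (var2 : String) : Decidable (Pre_twovar data var1 var2) := by unfold Pre_twovar; infer_instance
def pvWitness_twovar : (List (List (String × String))) × String × String :=
  ([[("s", "NY"), ("r", "yes")], [("s", "NY"), ("r", "no")], [("s", "CA"), ("r", "yes")]], "s", "r")

def Spec_twovar (data : List (List (String × String))) (var1 : String) (var2 : String) (out : List (String × List (String × Int))) : Prop := out = twovar_alt data var1 var2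
instance (data : List (List (String × String))) (var1 : String) (var2 : String) (out : List (String × List (String × Int))) : Decidable (Spec_twovar data var1 var2 out) := by unfold Spec_twovar; infer_instance

-- ===== CLAIM (what is proved, stated in full; the proofs are below) =====
def Claim_equal_twovar : Prop := ∀ (data : List (List (String × String))) (var1 : String) (var2 : String), Dom_twovar data var1 var2 → Pre_twovar data var1 var2 → Spec_twovar data var1 var2 (twovar data var1 var2)

-- ===== LEMMAS AND PROOFS =====

def pvStepA (d : PySem.Dict String (PySem.Dict String Int)) (p : String × String) :
    PySem.Dict String (PySem.Dict String Int) :=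
  let d := if d.contains p.1 then d else d.insert p.1 PySem.Dict.empty
  let inner := d.getD p.1 PySem.Dict.empty
  if inner.contains p.2 then
    d.insert p.1 (inner.insert p.2 (inner.getD p.2 0 + 1))
  else
    d.insert p.1 (inner.insert p.2 1)

def pvG (ps : List (String × String)) (v1 : String) : String × PySem.Dict String Int :=
  (v1, PySem.Dict.mk (((PySem.Set.ofList ps).filter (fun q => q.1 == v1)).map
        (fun q => (q.2, (ps.count q : Int)))))

def pvCanon (ps : List (String × String)) : PySem.Dict String (PySem.Dict String Int) :=
  PySem.Dict.mk ((PySem.Set.ofList (ps.map Prod.fst)).map (pvG ps))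

theorem pvGetD_mk_map {γ κ ν : Type} [BEq κ] [LawfulBEq κ] (l : List γ) (key : γ → κ) (val : γ → ν)
    (dflt : ν) (x : γ) (hx : x ∈ l) (hnd : (l.map key).Nodup) :
    (PySem.Dict.mk (l.map (fun q => (key q, val q)))).getD (key x) dflt = val x := by
  induction l with
  | nil => simp at hx
  | cons y l ih =>
    rw [List.map_cons, PySem.Dict.getD_eq_get?_getD, PySem.Dict.get?_mk_cons]
    rcases List.mem_cons.mp hx with heq | hx'
    · subst heq; simp
    · by_cases h : key y = key x
      · exfalso
        have : key x ∈ l.map key := List.mem_map_of_mem hx'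
        simp at hnd
        exact hnd.1 _ hx' h.symm
      · have hne : (key y == key x) = false := by simp [h]
        rw [hne]
        simp only [Bool.false_eq_true, if_false]
        rw [← PySem.Dict.getD_eq_get?_getD]
        exact ih hx' (by simp at hnd ⊢; exact hnd.2)

-- outer contains
theorem pv_contains_canon (ps : List (String × String)) (x : String) :
    (pvCanon ps).contains x = decide (x ∈ ps.map Prod.fst) := by
  unfold pvCanon
  rw [PySem.Dict.contains_mk]
  simp only [List.any_map, Function.comp_def, pvG]
  by_cases hm : x ∈ ps.map Prod.fst
  · simp only [hm, decide_true]
    exact List.any_eq_true.mpr ⟨x, (PySem.Set.mem_ofList _ _).mpr hm, by simp⟩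
  · simp only [hm, decide_false]
    apply List.any_eq_false.mpr
    intro y hy
    simp only [beq_iff_eq]
    intro he
    exact hm (by rw [← he]; exact (PySem.Set.mem_ofList _ _).mp hy)

-- outer getD
theorem pv_getD_canon (ps : List (String × String)) (x : String) (hx : x ∈ ps.map Prod.fst) :
    (pvCanon ps).getD x PySem.Dict.empty = (pvG ps x).2 := by
  unfold pvCanon
  have h := pvGetD_mk_map (PySem.Set.ofList (ps.map Prod.fst)) (fun y => y)
      (fun y => (pvG ps y).2) PySem.Dict.empty x
      ((PySem.Set.mem_ofList _ _).mpr hx)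
      (by simpa using PySem.Set.nodup_ofList (ps.map Prod.fst))
  simpa [pvG] using h

-- members of the inner filtered list
theorem pv_mem_filter (ps : List (String × String)) (v1 : String) (q : String × String) :
    q ∈ (PySem.Set.ofList ps).filter (fun q => q.1 == v1) ↔ q ∈ ps ∧ q.1 = v1 := by
  simp [List.mem_filter, PySem.Set.mem_ofList]

-- inner key list is nodup
theorem pv_inner_nodup (ps : List (String × String)) (v1 : String) :
    ((((PySem.Set.ofList ps).filter (fun q => q.1 == v1))).map Prod.snd).Nodup := by
  apply List.Nodup.map_on
  · intro a ha b hb hab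
    rw [pv_mem_filter] at ha hb
    exact Prod.ext (ha.2.trans hb.2.symm) hab
  · exact (PySem.Set.nodup_ofList ps).filter _

-- inner contains
theorem pv_inner_contains (ps : List (String × String)) (v1 v2 : String) :
    (pvG ps v1).2.contains v2 = decide ((v1, v2) ∈ ps) := by
  simp only [pvG]
  rw [PySem.Dict.contains_mk]
  simp only [List.any_map, Function.comp_def]
  rcases h : decide ((v1, v2) ∈ ps) with _ | _
  · simp only [decide_eq_false_iff_not] at h
    apply List.any_eq_false.mpr
    intro q hq
    rw [pv_mem_filter] at hq
    simp only [beq_iff_eq]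
    intro h2
    exact h (by rw [← hq.2, ← h2] at *; exact hq.1)
  · simp only [decide_eq_true_eq] at h
    apply List.any_eq_true.mpr
    exact ⟨(v1, v2), (pv_mem_filter ps v1 _).mpr ⟨h, rfl⟩, by simp⟩

-- inner getD
theorem pv_inner_getD (ps : List (String × String)) (v1 v2 : String) (h : (v1, v2) ∈ ps) :
    (pvG ps v1).2.getD v2 0 = (ps.count (v1, v2) : Int) := by
  simp only [pvG]
  have hg := pvGetD_mk_map ((PySem.Set.ofList ps).filter (fun q => q.1 == v1)) Prod.snd
      (fun q => (ps.count q : Int)) 0 (v1, v2)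
      ((pv_mem_filter ps v1 _).mpr ⟨h, rfl⟩) (pv_inner_nodup ps v1)
  simpa using hg

-- appending a pair whose fst is ≠ x does not change pvG at x
theorem pv_pvG_append_ne (ps : List (String × String)) (p : String × String) (x : String)
    (hx : x ≠ p.1) : pvG (ps ++ [p]) x = pvG ps x := by
  unfold pvG
  have hfil : (PySem.Set.ofList (ps ++ [p])).filter (fun q => q.1 == x)
      = (PySem.Set.ofList ps).filter (fun q => q.1 == x) := by
    rw [PySem.Set.ofList_append_singleton, PySem.Set.add_eq_ite]
    by_cases hp : p ∈ PySem.Set.ofList ps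
    · rw [if_pos hp]
    · rw [if_neg hp, List.filter_append]
      simp [hx.symm]
  rw [hfil]
  congr 1
  apply PySem.Dict.ext
  apply List.map_congr_left
  intro q hq
  rw [pv_mem_filter] at hq
  have : q ≠ p := fun he => hx (by rw [← hq.2, he])
  simp [List.count_append, List.count_singleton, this]
  exact fun he => this he.symm

theorem pvG_fst (ps : List (String × String)) (x : String) : (pvG ps x).1 = x := rfl

theorem pv_ofList_append_mem (ps : List (String × String)) (p : String × String) (hp : p ∈ ps) :
    PySem.Set.ofList (ps ++ [p]) = PySem.Set.ofList ps := by
  rw [PySem.Set.ofList_append_singleton, PySem.Set.add_of_mem]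
  exact (PySem.Set.mem_ofList _ _).mpr hp

theorem pvStepA_canon (ps : List (String × String)) (p : String × String) :
    pvStepA (pvCanon ps) p = pvCanon (ps ++ [p]) := by
  obtain ⟨v1, v2⟩ := p
  unfold pvStepA
  by_cases h1 : v1 ∈ ps.map Prod.fst
  · -- v1 already a key of the outer dict
    have hc : (pvCanon ps).contains v1 = true := by
      rw [pv_contains_canon]; exact decide_eq_true h1
    simp only [hc, if_true, pv_getD_canon ps v1 h1]
    have houter : PySem.Set.ofList ((ps ++ [(v1, v2)]).map Prod.fst)
        = PySem.Set.ofList (ps.map Prod.fst) := by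
      rw [List.map_append, List.map_singleton, PySem.Set.ofList_append_singleton,
        PySem.Set.add_of_mem ((PySem.Set.mem_ofList _ _).mpr h1)]
    by_cases h2 : (v1, v2) ∈ ps
    · -- the pair itself already seen: increment in place
      have hic : (pvG ps v1).2.contains v2 = true := by
        rw [pv_inner_contains]; exact decide_eq_true h2
      simp only [hic, if_true, pv_inner_getD ps v1 v2 h2]
      apply PySem.Dict.ext
      rw [PySem.Dict.items_insert_of_contains _ _ hc]
      show _ = (pvCanon (ps ++ [(v1, v2)])).items
      unfold pvCanon
      rw [houter, List.map_map]
      apply List.map_congr_left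
      intro x hxF
      simp only [Function.comp_def, pvG_fst, beq_iff_eq]
      by_cases hx : x = v1
      · subst hx
        rw [if_pos rfl]
        refine Prod.ext rfl ?_
        apply PySem.Dict.ext
        rw [PySem.Dict.items_insert_of_contains _ _ hic]
        simp only [pvG]
        rw [pv_ofList_append_mem ps _ h2, List.map_map]
        apply List.map_congr_left
        intro q hq
        rw [pv_mem_filter] at hq
        simp only [Function.comp_def, beq_iff_eq]
        by_cases hqv : q.2 = v2
        · have hqp : q = (x, v2) := Prod.ext hq.2 hqv
          subst hqp
          rw [if_pos rfl]
          simp [List.count_append]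
        · rw [if_neg hqv]
          have : ¬ ((x, v2) = q) := fun he => hqv (by rw [← he])
          simp [List.count_append, this]
      · rw [if_neg hx]
        exact (pv_pvG_append_ne ps (v1, v2) x hx).symm
    · -- v1 seen, v2 new for it: append to the inner dict
      have hic : (pvG ps v1).2.contains v2 = false := by
        rw [pv_inner_contains]; exact decide_eq_false h2
      simp only [hic, Bool.false_eq_true, if_false]
      apply PySem.Dict.ext
      rw [PySem.Dict.items_insert_of_contains _ _ hc]
      show _ = (pvCanon (ps ++ [(v1, v2)])).items
      unfold pvCanon
      rw [houter, List.map_map]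
      apply List.map_congr_left
      intro x hxF
      simp only [Function.comp_def, pvG_fst, beq_iff_eq]
      by_cases hx : x = v1
      · subst hx
        rw [if_pos rfl]
        refine Prod.ext rfl ?_
        apply PySem.Dict.ext
        rw [PySem.Dict.items_insert_of_not_contains _ _ hic]
        simp only [pvG]
        have hnm : (x, v2) ∉ PySem.Set.ofList ps := by
          rw [PySem.Set.mem_ofList]; exact h2
        rw [PySem.Set.ofList_append_singleton, PySem.Set.add_of_not_mem hnm,
          List.filter_append]
        have hkeep : List.filter (fun q => q.1 == x) [(x, v2)] = [(x, v2)] := by simp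
        rw [hkeep, List.map_append, List.map_singleton]
        refine congrArg₂ (· ++ ·) ?_ ?_
        · show List.map (fun q => (q.2, ((ps.count q : Int)))) _ = _
          apply List.map_congr_left
          intro q hq
          rw [pv_mem_filter] at hq
          have : ¬ ((x, v2) = q) := fun he => h2 (by rw [he]; exact hq.1)
          simp [List.count_append, this]
        · have : List.count (x, v2) ps = 0 := List.count_eq_zero.mpr h2
          simp [List.count_append, this]
      · rw [if_neg hx]
        exact (pv_pvG_append_ne ps (v1, v2) x hx).symm
  · -- v1 brand new
    have hc : (pvCanon ps).contains v1 = false := by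
      rw [pv_contains_canon]; exact decide_eq_false h1
    have h2 : (v1, v2) ∉ ps := fun h => h1 (List.mem_map_of_mem (f := Prod.fst) h)
    simp only [hc, Bool.false_eq_true, if_false, PySem.Dict.getD_insert_self,
      PySem.Dict.contains_empty, PySem.Dict.insert_insert_self]
    apply PySem.Dict.ext
    rw [PySem.Dict.items_insert_of_not_contains _ _ hc]
    show _ = (pvCanon (ps ++ [(v1, v2)])).items
    unfold pvCanon
    have houter : PySem.Set.ofList ((ps ++ [(v1, v2)]).map Prod.fst)
        = PySem.Set.ofList (ps.map Prod.fst) ++ [v1] := by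
      rw [List.map_append, List.map_singleton, PySem.Set.ofList_append_singleton,
        PySem.Set.add_of_not_mem (by rw [PySem.Set.mem_ofList]; exact h1)]
    rw [houter, List.map_append, List.map_singleton]
    refine congrArg₂ (· ++ ·) ?_ ?_
    · apply List.map_congr_left
      intro x hxF
      have hx : x ≠ v1 := by
        intro he; subst he
        exact h1 ((PySem.Set.mem_ofList _ _).mp hxF)
      exact (pv_pvG_append_ne ps (v1, v2) x hx).symm
    · unfold pvG
      refine congrArg (fun z => [(v1, z)]) ?_
      apply PySem.Dict.ext
      rw [PySem.Dict.items_insert_of_not_contains _ _ (PySem.Dict.contains_empty v2)]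
      have hnm : (v1, v2) ∉ PySem.Set.ofList ps := by
        rw [PySem.Set.mem_ofList]; exact h2
      rw [PySem.Set.ofList_append_singleton, PySem.Set.add_of_not_mem hnm, List.filter_append]
      have hnil : List.filter (fun q => q.1 == v1) (PySem.Set.ofList ps) = [] := by
        apply List.filter_eq_nil_iff.mpr
        intro q hq
        simp only [beq_iff_eq]
        intro he
        exact h1 (he ▸ List.mem_map_of_mem (f := Prod.fst) ((PySem.Set.mem_ofList _ _).mp hq))
      rw [hnil]
      have : List.count (v1, v2) ps = 0 := List.count_eq_zero.mpr h2
      simp [List.count_append, this, PySem.Dict.empty]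

def pvStepB (d : PySem.Dict String (PySem.Dict String Int)) (q : (String × String) × Int) :
    PySem.Dict String (PySem.Dict String Int) :=
  if d.contains q.1.1 then
    d.insert q.1.1 ((d.getD q.1.1 PySem.Dict.empty).insert q.1.2 q.2)
  else
    d.insert q.1.1 (PySem.Dict.mk [(q.1.2, q.2)])

def pvH (qs : List (String × String)) (f : String × String → Int) (v1 : String) :
    String × PySem.Dict String Int :=
  (v1, PySem.Dict.mk ((qs.filter (fun q => q.1 == v1)).map (fun q => (q.2, f q))))

def pvPivCanon (qs : List (String × String)) (f : String × String → Int) :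
    PySem.Dict String (PySem.Dict String Int) :=
  PySem.Dict.mk ((PySem.Set.ofList (qs.map Prod.fst)).map (pvH qs f))

theorem pvH_fst (qs : List (String × String)) (f : String × String → Int) (x : String) :
    (pvH qs f x).1 = x := rfl

theorem pv_contains_piv (qs : List (String × String)) (f : String × String → Int) (x : String) :
    (pvPivCanon qs f).contains x = decide (x ∈ qs.map Prod.fst) := by
  unfold pvPivCanon
  rw [PySem.Dict.contains_mk]
  simp only [List.any_map, Function.comp_def, pvH_fst]
  by_cases hm : x ∈ qs.map Prod.fst
  · simp only [hm, decide_true]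
    exact List.any_eq_true.mpr ⟨x, (PySem.Set.mem_ofList _ _).mpr hm, by simp⟩
  · simp only [hm, decide_false]
    apply List.any_eq_false.mpr
    intro y hy
    simp only [beq_iff_eq]
    intro he
    exact hm (by rw [← he]; exact (PySem.Set.mem_ofList _ _).mp hy)

theorem pv_getD_piv (qs : List (String × String)) (f : String × String → Int) (x : String)
    (hx : x ∈ qs.map Prod.fst) :
    (pvPivCanon qs f).getD x PySem.Dict.empty = (pvH qs f x).2 := by
  unfold pvPivCanon
  have h := pvGetD_mk_map (PySem.Set.ofList (qs.map Prod.fst)) (fun y => y)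
      (fun y => (pvH qs f y).2) PySem.Dict.empty x
      ((PySem.Set.mem_ofList _ _).mpr hx)
      (by simpa using PySem.Set.nodup_ofList (qs.map Prod.fst))
  simpa [pvH] using h

theorem pvH_append_ne (qs : List (String × String)) (f : String × String → Int)
    (k : String × String) (x : String) (hx : x ≠ k.1) :
    pvH (qs ++ [k]) f x = pvH qs f x := by
  unfold pvH
  rw [List.filter_append]
  have : List.filter (fun q => q.1 == x) [k] = [] := by simp [hx.symm]
  rw [this, List.append_nil]

theorem pvStepB_piv (qs : List (String × String)) (f : String × String → Int)
    (k : String × String) (hk : k ∉ qs) :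
    pvStepB (pvPivCanon qs f) (k, f k) = pvPivCanon (qs ++ [k]) f := by
  obtain ⟨v1, v2⟩ := k
  unfold pvStepB
  by_cases h1 : v1 ∈ qs.map Prod.fst
  · have hc : (pvPivCanon qs f).contains v1 = true := by
      rw [pv_contains_piv]; exact decide_eq_true h1
    simp only [hc, if_true, pv_getD_piv qs f v1 h1]
    apply PySem.Dict.ext
    rw [PySem.Dict.items_insert_of_contains _ _ hc]
    show _ = (pvPivCanon (qs ++ [(v1, v2)]) f).items
    unfold pvPivCanon
    have houter : PySem.Set.ofList ((qs ++ [(v1, v2)]).map Prod.fst)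
        = PySem.Set.ofList (qs.map Prod.fst) := by
      rw [List.map_append, List.map_singleton, PySem.Set.ofList_append_singleton,
        PySem.Set.add_of_mem ((PySem.Set.mem_ofList _ _).mpr h1)]
    rw [houter, List.map_map]
    apply List.map_congr_left
    intro x hxF
    simp only [Function.comp_def, pvH_fst, beq_iff_eq]
    by_cases hx : x = v1
    · subst hx
      rw [if_pos rfl]
      refine Prod.ext rfl ?_
      have hfresh : (pvH qs f x).2.contains v2 = false := by
        simp only [pvH]
        rw [PySem.Dict.contains_mk]
        apply List.any_eq_false.mpr
        intro e he
        simp only [List.mem_map] at he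
        obtain ⟨q, hq, rfl⟩ := he
        rw [List.mem_filter, beq_iff_eq] at hq
        simp only [beq_iff_eq]
        intro he2
        exact hk ((Prod.ext hq.2 he2 : q = (x, v2)) ▸ hq.1)
      apply PySem.Dict.ext
      rw [PySem.Dict.items_insert_of_not_contains _ _ hfresh]
      simp only [pvH]
      rw [List.filter_append]
      have hkeep : List.filter (fun q => q.1 == x) [(x, v2)] = [(x, v2)] := by simp
      rw [hkeep, List.map_append, List.map_singleton]
    · rw [if_neg hx]
      exact (pvH_append_ne qs f (v1, v2) x hx).symm
  · have hc : (pvPivCanon qs f).contains v1 = false := by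
      rw [pv_contains_piv]; exact decide_eq_false h1
    simp only [hc, Bool.false_eq_true, if_false]
    apply PySem.Dict.ext
    rw [PySem.Dict.items_insert_of_not_contains _ _ hc]
    show _ = (pvPivCanon (qs ++ [(v1, v2)]) f).items
    unfold pvPivCanon
    have houter : PySem.Set.ofList ((qs ++ [(v1, v2)]).map Prod.fst)
        = PySem.Set.ofList (qs.map Prod.fst) ++ [v1] := by
      rw [List.map_append, List.map_singleton, PySem.Set.ofList_append_singleton,
        PySem.Set.add_of_not_mem (by rw [PySem.Set.mem_ofList]; exact h1)]
    rw [houter, List.map_append, List.map_singleton]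
    refine congrArg₂ (· ++ ·) ?_ ?_
    · apply List.map_congr_left
      intro x hxF
      have hx : x ≠ v1 := by
        intro he; subst he
        exact h1 ((PySem.Set.mem_ofList _ _).mp hxF)
      exact (pvH_append_ne qs f (v1, v2) x hx).symm
    · unfold pvH
      rw [List.filter_append]
      have hnil : List.filter (fun q => q.1 == v1) qs = [] := by
        apply List.filter_eq_nil_iff.mpr
        intro q hq
        simp only [beq_iff_eq]
        intro he
        exact h1 (he ▸ List.mem_map_of_mem (f := Prod.fst) hq)
      have hkeep : List.filter (fun q => q.1 == v1) [(v1, v2)] = [(v1, v2)] := by simp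
      rw [hnil, hkeep]
      rfl

theorem pvPIV (qs : List (String × String)) (f : String × String → Int) (hnd : qs.Nodup) :
    (qs.map (fun k => (k, f k))).foldl pvStepB PySem.Dict.empty = pvPivCanon qs f := by
  induction qs using List.reverseRecOn with
  | nil => rfl
  | append_singleton qs k ih =>
    have hnd' := hnd.of_append_left
    have hk : k ∉ qs := fun h =>
      (List.disjoint_of_nodup_append hnd) h (List.mem_singleton_self k)
    rw [List.map_append, List.map_singleton, List.foldl_append, List.foldl_cons, List.foldl_nil,
      ih hnd', pvStepB_piv qs f k hk]

theorem pvLA (ps : List (String × String)) :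
    ps.foldl pvStepA PySem.Dict.empty = pvCanon ps := by
  induction ps using List.reverseRecOn with
  | nil => rfl
  | append_singleton ps p ih =>
    rw [List.foldl_append, List.foldl_cons, List.foldl_nil, ih, pvStepA_canon]

theorem pvOfList_map_ofList {α β : Type} [BEq α] [LawfulBEq α] [BEq β] [LawfulBEq β]
    (l : List α) (f : α → β) :
    PySem.Set.ofList ((PySem.Set.ofList l).map f) = PySem.Set.ofList (l.map f) := by
  induction l using List.reverseRecOn with
  | nil => rfl
  | append_singleton l x ih =>
    rw [PySem.Set.ofList_append_singleton, PySem.Set.add_eq_ite, List.map_append, List.map_singleton,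
      PySem.Set.ofList_append_singleton, PySem.Set.add_eq_ite]
    by_cases hx : x ∈ PySem.Set.ofList l
    · rw [if_pos hx, ih, if_pos]
      rw [PySem.Set.mem_ofList] at hx ⊢
      exact List.mem_map_of_mem hx
    · rw [if_neg hx, List.map_append, List.map_singleton, PySem.Set.ofList_append_singleton,
        PySem.Set.add_eq_ite, ih]
theorem pvPivEq (ps : List (String × String)) :
    pvPivCanon (PySem.Set.ofList ps) (fun k => (List.count k ps : Int)) = pvCanon ps := by
  unfold pvPivCanon pvCanon
  rw [pvOfList_map_ofList]
  rfl



-- the (row[var1], row[var2]) pair of one row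
def pvKey (var1 var2 : String) (row : List (String × String)) : String × String :=
  ((PySem.Dict.mk row).getD var1 "", (PySem.Dict.mk row).getD var2 "")

-- A's result, in canonical form
theorem pvA_eq (data : List (List (String × String))) (var1 var2 : String) :
    twovar data var1 var2
      = (pvCanon (data.map (pvKey var1 var2))).items.map (fun p => (p.1, p.2.items)) := by
  unfold twovar
  have h : data.foldl (fun result row =>
      let value1 := (PySem.Dict.mk row).getD var1 ""
      let value2 := (PySem.Dict.mk row).getD var2 ""
      let result := if result.contains value1 then result else result.insert value1 PySem.Dict.empty
      let inner := result.getD value1 PySem.Dict.empty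
      if inner.contains value2 then
        result.insert value1 (inner.insert value2 (inner.getD value2 0 + 1))
      else
        result.insert value1 (inner.insert value2 1))
      (PySem.Dict.empty : PySem.Dict String (PySem.Dict String Int))
      = (data.map (pvKey var1 var2)).foldl pvStepA PySem.Dict.empty := by
    rw [List.foldl_map]
    rfl
  rw [h, pvLA]

-- B's result, in canonical form
theorem pvB_eq (data : List (List (String × String))) (var1 var2 : String) :
    twovar_alt data var1 var2
      = (pvCanon (data.map (pvKey var1 var2))).items.map (fun p => (p.1, p.2.items)) := by
  unfold twovar_alt
  have hflat : data.foldl (fun flat row =>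
      let key := ((PySem.Dict.mk row).getD var1 "", (PySem.Dict.mk row).getD var2 "")
      flat.insert key (flat.getD key 0 + 1))
      (PySem.Dict.empty : PySem.Dict (String × String) Int)
      = PySem.Dict.counter (data.map (pvKey var1 var2)) := by
    rw [← PySem.Dict.foldl_insert_getD_add_one_eq_counter, List.foldl_map]
    rfl
  rw [hflat]
  show ((PySem.Dict.counter (data.map (pvKey var1 var2))).items.foldl
      (fun result q =>
        if result.contains q.1.1 then
          result.insert q.1.1 ((result.getD q.1.1 PySem.Dict.empty).insert q.1.2 q.2)
        else
          result.insert q.1.1 (PySem.Dict.mk [(q.1.2, q.2)]))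
      PySem.Dict.empty).items.map (fun p => (p.1, p.2.items)) = _
  rw [PySem.Dict.items_counter]
  have hpiv : ((PySem.Set.ofList (data.map (pvKey var1 var2))).map
        (fun k => (k, (List.count k (data.map (pvKey var1 var2)) : Int)))).foldl
        (fun result q =>
          if result.contains q.1.1 then
            result.insert q.1.1 ((result.getD q.1.1 PySem.Dict.empty).insert q.1.2 q.2)
          else
            result.insert q.1.1 (PySem.Dict.mk [(q.1.2, q.2)]))
        PySem.Dict.empty
      = pvCanon (data.map (pvKey var1 var2)) := by
    rw [show (fun (result : PySem.Dict String (PySem.Dict String Int)) (q : (String × String) × Int) =>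
          if result.contains q.1.1 then
            result.insert q.1.1 ((result.getD q.1.1 PySem.Dict.empty).insert q.1.2 q.2)
          else
            result.insert q.1.1 (PySem.Dict.mk [(q.1.2, q.2)])) = pvStepB from rfl]
    rw [pvPIV _ _ (PySem.Set.nodup_ofList _), pvPivEq]
  rw [hpiv]

-- ===== VERDICT (by name: the statement is the Claim_ definition above) =====
theorem twovar_spec : Claim_equal_twovar := by
  intro data var1 var2 _ _
  unfold Spec_twovar
  rw [pvA_eq, pvB_eq]
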